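-- pv_equiv track=rewrite | github.com/Azurecccc/ACM | 2799.py | func
-- ===== SOURCE A (Python) =====
-- def func(s):
--     n = len(s)
--     if n == 1:
--         return 1
--     first_half = s[:n//2]
--     second_half = s[-1:n//2-1:-1]
--     if first_half == second_half:
--         return func(s[:n//2])
--     else:
--         return n
-- ===== SOURCE B (Python) =====
-- def func(s):
--     m = len(s)
--     while m != 1:
--         if m % 2 or s[:m] != s[m-1::-1]:
--             return m
--         m //= 2
--     return 1
-- ===== Notes on version B (the rewrite author's own statement) =====
-- stated objective: alternative
-- what changed: Replaces A's recursion on ever-shorter string copies with an iterative loop over a single integer length m against the fixed original string: it tests oddness of m and whether the prefix s[:m] equals its own reversal s[m-1::-1], halving m instead of slicing a new string.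
-- outside the precondition, e.g. on func(''): A raises RecursionError, B does not finish within the time limit
import Mathlib
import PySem

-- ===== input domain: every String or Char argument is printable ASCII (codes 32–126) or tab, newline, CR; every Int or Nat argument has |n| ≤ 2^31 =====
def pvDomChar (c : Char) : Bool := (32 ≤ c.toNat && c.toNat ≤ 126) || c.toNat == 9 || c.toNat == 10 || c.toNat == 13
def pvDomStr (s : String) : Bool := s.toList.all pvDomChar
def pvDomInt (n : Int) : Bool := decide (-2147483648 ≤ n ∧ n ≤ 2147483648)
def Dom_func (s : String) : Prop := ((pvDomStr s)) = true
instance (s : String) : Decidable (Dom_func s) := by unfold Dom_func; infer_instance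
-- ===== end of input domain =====

-- B replaces A's recursion on shrinking string copies by an iterative loop over one integer
-- length m against the fixed original string (alternative decomposition; return value only).

-- ===== PORT A =====
-- fuel = one unit per recursion level; func supplies length+1, which the proof shows is
-- enough for every nonempty string (the fuel-0 value 0 is only reachable for the empty
-- string, on which Python's A recurses forever — excluded by Pre_func).
def funcAux : Nat → List Char → Int
  | 0, _ => 0
  | fuel + 1, l =>
    let n : Int := (l.length : Int)
    if n = 1 then 1
    else
      let firstHalf := PySem.List.slice l none (some (PySem.Int.floordiv n 2))
      -- s[-1:n//2-1:-1]; step -1 ≠ 0, so slice? is always `some` here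
      let secondHalf := (PySem.List.slice? l (some (-1)) (some (PySem.Int.floordiv n 2 - 1)) (-1)).getD []
      if firstHalf = secondHalf then
        funcAux fuel (PySem.List.slice l none (some (PySem.Int.floordiv n 2)))
      else n

def func (s : String) : Int := funcAux (s.toList.length + 1) s.toList

-- ===== PORT B =====
-- B's loop state is the integer m only; the string is never reassigned.
-- fuel = one loop iteration per unit; length+1 is plenty since m halves each iteration.
def funcAltLoop (l : List Char) : Nat → Int → Int
  | 0, _ => 0
  | fuel + 1, m =>
    if m ≠ 1 then
      -- s[m-1::-1]; step -1 ≠ 0, so slice? is always `some` here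
      if PySem.Int.mod m 2 ≠ 0 ∨
         PySem.List.slice l none (some m) ≠ (PySem.List.slice? l (some (m - 1)) none (-1)).getD []
      then m
      else funcAltLoop l fuel (PySem.Int.floordiv m 2)
    else 1

def func_alt (s : String) : Int := funcAltLoop s.toList (s.toList.length + 1) (s.toList.length : Int)

-- ===== PRECONDITION & SPEC =====
-- Pre_: the string is nonempty; on "" Python's A recurses forever (RecursionError).
def Pre_func (s : String) : Prop := s.toList ≠ []
instance (s : String) : Decidable (Pre_func s) := by unfold Pre_func; infer_instance

def pvWitness_func : String := "abba"

def Spec_func (s : String) (out : Int) : Prop := out = func_alt s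
instance (s : String) (out : Int) : Decidable (Spec_func s out) := by unfold Spec_func; infer_instance

-- ===== CLAIM =====
def Claim_equal_func : Prop := ∀ (s : String), Dom_func s → Pre_func s → Spec_func s (func s)

-- ===== LEMMAS AND PROOFS =====

lemma floordiv_len_two (n : Nat) : PySem.Int.floordiv (n : Int) 2 = ((n / 2 : Nat) : Int) := by
  exact_mod_cast PySem.Int.floordiv_natCast n 2

lemma mod_len_two (n : Nat) : PySem.Int.mod (n : Int) 2 = ((n % 2 : Nat) : Int) := by
  exact_mod_cast PySem.Int.mod_natCast n 2

-- sliceIndices of s[-1:k-1:-1] for 1 ≤ k < n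
lemma sliceIdx_eval (n k : Nat) (hk1 : 1 ≤ k) (hkn : k < n) :
    PySem.List.sliceIndices n (some (-1)) (some ((k : Int) - 1)) (-1) =
      ((n : Int) - 1, (k : Int) - 1, -1) := by
  simp only [PySem.List.sliceIndices, Prod.mk.injEq]
  norm_num
  split_ifs <;> omega

-- sliceIndices of s[m-1::-1] for 1 ≤ m ≤ n
lemma sliceIdxPref (n m : Nat) (hm1 : 1 ≤ m) (hmn : m ≤ n) :
    PySem.List.sliceIndices n (some ((m : Int) - 1)) none (-1) =
      ((m : Int) - 1, -1, -1) := by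
  simp only [PySem.List.sliceIndices, Prod.mk.injEq]
  norm_num
  split_ifs <;> omega

-- the filtered index walk n-1, n-2, … is the reversed tail of the list
lemma revSeg (l : List Char) : ∀ m : Nat, m ≤ l.length →
    List.filterMap (fun j : Nat => l[((l.length : Int) - 1 + -1 * (j : Int)).toNat]?) (List.range m)
      = (l.drop (l.length - m)).reverse := by
  intro m
  induction m with
  | zero => simp
  | succ m ih =>
    intro h
    rw [List.range_succ, List.filterMap_append, ih (by omega)]
    have hidx : (((l.length : Int)) - 1 + -1 * (m : Int)).toNat = l.length - 1 - m := by omega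
    have hlt : l.length - 1 - m < l.length := by omega
    simp only [List.filterMap_cons, List.filterMap_nil, hidx]
    rw [List.getElem?_eq_getElem hlt]
    have e1 : l.length - (m + 1) = l.length - 1 - m := by omega
    have e2 : l.length - 1 - m + 1 = l.length - m := by omega
    rw [e1, List.drop_eq_getElem_cons (by omega : l.length - 1 - m < l.length), e2]
    simp

-- the index walk m-1, m-2, … is the reversed prefix of length m
lemma revPrefAux (l : List Char) (m : Nat) (hm : m ≤ l.length) : ∀ k, k ≤ m →
    List.filterMap (fun j : Nat => l[((m : Int) - 1 + -1 * (j : Int)).toNat]?) (List.range k)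
      = ((l.take m).drop (m - k)).reverse := by
  intro k
  induction k with
  | zero =>
    intro _
    simp
  | succ k ih =>
    intro h
    rw [List.range_succ, List.filterMap_append, ih (by omega)]
    have hidx : (((m : Int)) - 1 + -1 * (k : Int)).toNat = m - 1 - k := by omega
    have hlt : m - 1 - k < l.length := by omega
    simp only [List.filterMap_cons, List.filterMap_nil, hidx]
    rw [List.getElem?_eq_getElem hlt]
    have hlt' : m - (k + 1) < (l.take m).length := by simp; omega
    have e2 : m - (k + 1) + 1 = m - k := by omega
    rw [List.drop_eq_getElem_cons hlt', e2]
    have hget : (l.take m)[m - (k + 1)]'hlt' = l[m - 1 - k]'hlt := by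
      rw [List.getElem_take]
      congr 1
      omega
    simp [hget]

-- s[-1:k-1:-1] is the reversed second part s[k:]
lemma sliceRev (l : List Char) (k : Nat) (hk1 : 1 ≤ k) (hkn : k < l.length) :
    PySem.List.slice? l (some (-1)) (some ((k : Int) - 1)) (-1) = some ((l.drop k).reverse) := by
  rw [PySem.List.slice?, if_neg (by norm_num), sliceIdx_eval l.length k hk1 hkn]
  have hcount : (if (0 : Int) < -1 then
        (if ((l.length : Int) - 1) < ((k : Int) - 1) then
          ((((k : Int) - 1) - ((l.length : Int) - 1) + (-1) - 1) / (-1)).toNat else 0)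
      else
        (if ((k : Int) - 1) < ((l.length : Int) - 1) then
          ((((l.length : Int) - 1) - ((k : Int) - 1) + -(-1) - 1) / -(-1)).toNat else 0))
      = l.length - k := by
    norm_num
    all_goals intros
    all_goals omega
  simp only [hcount]
  rw [revSeg l (l.length - k) (by omega), show l.length - (l.length - k) = k from by omega]

-- s[m-1::-1] is the reversed prefix s[:m]
lemma revPref (l : List Char) (m : Nat) (hm1 : 1 ≤ m) (hmn : m ≤ l.length) :
    PySem.List.slice? l (some ((m : Int) - 1)) none (-1) = some ((l.take m).reverse) := by
  rw [PySem.List.slice?, if_neg (by norm_num), sliceIdxPref l.length m hm1 hmn]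
  have hcount : (if (0 : Int) < -1 then
        (if ((m : Int) - 1) < (-1 : Int) then
          (((-1 : Int) - ((m : Int) - 1) + (-1) - 1) / (-1)).toNat else 0)
      else
        (if (-1 : Int) < ((m : Int) - 1) then
          ((((m : Int) - 1) - (-1) + -(-1) - 1) / -(-1)).toNat else 0))
      = m := by
    norm_num
    all_goals intros
    all_goals omega
  simp only [hcount]
  rw [revPrefAux l m hmn m le_rfl]
  simp

-- A's half-slice equality is exactly "even length and palindrome"
lemma cond_iff (l : List Char) (h2 : 2 ≤ l.length) :
    l.take (l.length / 2) = (l.drop (l.length / 2)).reverse ↔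
      (l.length % 2 = 0 ∧ l = l.reverse) := by
  constructor
  · intro h
    have hlen : l.length / 2 = l.length - l.length / 2 := by
      have := congrArg List.length h
      simp only [List.length_take, List.length_reverse, List.length_drop] at this
      omega
    refine ⟨by omega, ?_⟩
    calc l = l.take (l.length / 2) ++ l.drop (l.length / 2) := (List.take_append_drop _ _).symm
      _ = (l.drop (l.length / 2)).reverse ++ (l.take (l.length / 2)).reverse := by
            rw [h, List.reverse_reverse]
      _ = (l.take (l.length / 2) ++ l.drop (l.length / 2)).reverse := (List.reverse_append).symm
      _ = l.reverse := by rw [List.take_append_drop]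
  · rintro ⟨hmod, hpal⟩
    set k := l.length / 2 with hk
    have hlen : ((l.drop k).reverse).length = k := by
      simp only [List.length_reverse, List.length_drop]; omega
    conv_lhs => rw [hpal]
    rw [show l.reverse = (l.drop k).reverse ++ (l.take k).reverse from by
          rw [← List.reverse_append, List.take_append_drop]]
    have hto := List.take_left (l₁ := (l.drop k).reverse) (l₂ := (l.take k).reverse)
    rw [hlen] at hto
    exact hto

-- the invariant linking A's shrinking list to B's shrinking integer:
-- A's current string is l0.take m while B's current state is m
lemma loop_eq (f1 : Nat) : ∀ (l0 : List Char) (m : Nat) (f2 : Nat),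
    1 ≤ m → m ≤ l0.length → m < f1 → m < f2 →
    funcAux f1 (l0.take m) = funcAltLoop l0 f2 (m : Int) := by
  induction f1 with
  | zero => intro _ _ _ _ _ hf _; omega
  | succ f ih =>
    intro l0 m f2 hm1 hmn hf1 hf2
    obtain ⟨g, rfl⟩ : ∃ g, f2 = g + 1 := ⟨f2 - 1, by omega⟩
    have hL : (l0.take m).length = m := by simp; omega
    by_cases h1 : m = 1
    · subst h1
      simp only [funcAux, funcAltLoop, hL]
      norm_num
    · have h2 : 2 ≤ m := by omega
      have hk1 : 1 ≤ m / 2 := by omega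
      have hkn : m / 2 < m := by omega
      simp only [funcAux, funcAltLoop, hL]
      rw [if_neg (show ¬ ((m : Int)) = 1 from by exact_mod_cast h1),
          if_pos (show (m : Int) ≠ 1 from by exact_mod_cast h1)]
      have hsliceB : PySem.List.slice l0 none (some (m : Int)) = l0.take m := by
        simp [PySem.List.slice_to_natCast l0 m]
      have hrevB := revPref l0 m hm1 hmn
      have hAfst : PySem.List.slice (l0.take m) none (some (PySem.Int.floordiv ((l0.take m).length : Int) 2))
          = (l0.take m).take (m / 2) := by
        rw [hL, floordiv_len_two]
        simpa using PySem.List.slice_to_natCast (l0.take m) (m / 2)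
      have hAsnd : (PySem.List.slice? (l0.take m) (some (-1))
            (some (PySem.Int.floordiv ((l0.take m).length : Int) 2 - 1)) (-1)).getD []
          = ((l0.take m).drop (m / 2)).reverse := by
        rw [hL, floordiv_len_two, sliceRev (l0.take m) (m / 2) hk1 (by omega : m / 2 < (l0.take m).length)]
        rfl
      rw [hL] at hAfst hAsnd
      rw [hAfst, hAsnd, hsliceB, hrevB, mod_len_two]
      have hcond : ((l0.take m).take (m / 2) = ((l0.take m).drop (m / 2)).reverse) ↔
          ((m % 2 : Nat) = 0 ∧ l0.take m = (l0.take m).reverse) := by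
        have := cond_iff (l0.take m) (by omega)
        rwa [hL] at this
      by_cases hc : (l0.take m).take (m / 2) = ((l0.take m).drop (m / 2)).reverse
      · obtain ⟨hmod, hpal⟩ := hcond.mp hc
        have hBcond : ¬ (((m % 2 : Nat) : Int) ≠ 0 ∨
            l0.take m ≠ (some ((l0.take m).reverse)).getD []) := by
          simp only [Option.getD_some, ne_eq, not_or, not_not]
          exact ⟨by exact_mod_cast hmod, hpal⟩
        rw [if_pos hc, if_neg hBcond]
        have htt : List.take (m / 2) (List.take m l0) = List.take (m / 2) l0 := by
          rw [List.take_take]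
          congr 1
          omega
        rw [htt, floordiv_len_two]
        exact ih l0 (m / 2) g hk1 (by omega) (by omega) (by omega)
      · have hBcond : (((m % 2 : Nat) : Int) ≠ 0 ∨
            l0.take m ≠ (some ((l0.take m).reverse)).getD []) := by
          by_contra hno
          simp only [Option.getD_some, ne_eq, not_or, not_not] at hno
          exact hc (hcond.mpr ⟨by exact_mod_cast hno.1, hno.2⟩)
        rw [if_neg hc, if_pos hBcond]

-- ===== VERDICT =====
theorem func_spec : Claim_equal_func := by
  intro s _ hpre
  have h0 : 0 < s.toList.length := List.length_pos_iff.mpr hpre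
  have h := loop_eq (s.toList.length + 1) s.toList s.toList.length (s.toList.length + 1)
      (by omega) le_rfl (by omega) (by omega)
  rw [List.take_length] at h
  unfold Spec_func func func_alt
  exact h
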